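-- pv_equiv track=rewrite | github.com/lemire/exactshortlib | examples/adams.py | minmax_euclid_brute
-- ===== SOURCE A (Python) =====
-- def minmax_euclid_brute(z, M, R):
--     a = z % M
--     b = z % M
--     for w in range(1,R):
--         v = (w*z)%M
--         if v < a:
--             a = v
--         if v > b:
--             b = v
--     return a,b
-- ===== SOURCE B (Python) =====
-- # Euclidean (Stern-Brocot / three-distance) descent: tracks the current record
-- # min and max of (w*z) % M together with their multipliers and jumps over whole
-- # runs of identical steps, O(log M) instead of A's O(R) scan.
--
-- def _core(z, M, R):
--     mn = mx = z % M
--     if R <= 1: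
--         return (mn, mx)
--     wmn = wmx = 1
--     while True:
--         if mn + mx >= M:
--             kk = (R - 1 - wmn) // wmx
--             if kk == 0:
--                 break
--             d = M - mx
--             k = min(mn // d, kk)
--             mn -= k * d
--             wmn += k * wmx
--         else:
--             if mn == 0:
--                 break
--             kk = (R - 1 - wmx) // wmn
--             if kk == 0:
--                 break
--             k = min((M - 1 - mx) // mn, kk)
--             mx += k * mn
--             wmx += k * wmn
--     return (mn, mx)
--
-- def minmax_euclid_brute(z, M, R):
--     if M < 0:
--         lo, hi = _core(-z, -M, R)
--         return (-hi, -lo)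
--     return _core(z, M, R)
-- ===== Notes on version B (the rewrite author's own statement) =====
-- stated objective: faster
-- what changed: Replaced the O(R) scan over all multipliers by the Euclidean/three-distance descent that tracks the current record min and max of (w*z)%M with their multipliers and jumps over whole runs of equal steps (negative M handled by the mirror identity x%M = -((-x)%(-M))).
import Mathlib
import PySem

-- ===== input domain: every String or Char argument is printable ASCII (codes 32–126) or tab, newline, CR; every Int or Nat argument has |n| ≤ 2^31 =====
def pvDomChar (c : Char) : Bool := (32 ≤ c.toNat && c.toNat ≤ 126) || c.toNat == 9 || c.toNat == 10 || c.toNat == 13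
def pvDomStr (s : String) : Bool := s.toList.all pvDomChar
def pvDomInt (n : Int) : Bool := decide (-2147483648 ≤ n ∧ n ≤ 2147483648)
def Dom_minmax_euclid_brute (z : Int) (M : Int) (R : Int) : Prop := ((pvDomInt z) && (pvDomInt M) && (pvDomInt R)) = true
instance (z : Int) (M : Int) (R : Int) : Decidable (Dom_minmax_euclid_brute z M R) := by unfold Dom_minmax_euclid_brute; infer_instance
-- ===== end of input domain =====

-- B replaces A's O(R) scan by the Euclidean/three-distance descent over record minima
-- and maxima of (w*z) % M (objective: faster; a timing run measures the speed-up).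


-- ===== PORT A =====
def minmax_euclid_brute (z : Int) (M : Int) (R : Int) : List Int :=
  let a0 := PySem.Int.mod z M
  let p := (PySem.List.pyRange 1 R).foldl
    (fun (s : Int × Int) w =>
      let v := PySem.Int.mod (w * z) M
      (if v < s.1 then v else s.1, if v > s.2 then v else s.2)) (a0, a0)
  [p.1, p.2]

-- ===== PORT B =====
-- the 'while True' of Source B, with fuel making it total (M.toNat + 1 steps always suffice: the
-- gap mx - mn grows by at least 1 per iteration and is bounded by M - 1)
def pvEuclidLoop (z : Int) (M : Int) (R : Int) :
    Nat → Int → Int → Int → Int → Int × Int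
  | 0, mn, _, mx, _ => (mn, mx)
  | fuel+1, mn, wmn, mx, wmx =>
    if M ≤ mn + mx then
      let kk := PySem.Int.floordiv (R - 1 - wmn) wmx
      if kk = 0 then (mn, mx)
      else
        let d := M - mx
        let k := min (PySem.Int.floordiv mn d) kk
        pvEuclidLoop z M R fuel (mn - k * d) (wmn + k * wmx) mx wmx
    else
      if mn = 0 then (mn, mx)
      else
        let kk := PySem.Int.floordiv (R - 1 - wmx) wmn
        if kk = 0 then (mn, mx)
        else
          let k := min (PySem.Int.floordiv (M - 1 - mx) mn) kk
          pvEuclidLoop z M R fuel mn wmn (mx + k * mn) (wmx + k * wmn)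

def pvCore (z : Int) (M : Int) (R : Int) : Int × Int :=
  let mn := PySem.Int.mod z M
  if R ≤ 1 then (mn, mn)
  else pvEuclidLoop z M R (M.toNat + 1) mn 1 mn 1

def minmax_euclid_brute_alt (z : Int) (M : Int) (R : Int) : List Int :=
  if M < 0 then
    let p := pvCore (-z) (-M) R
    [-p.2, -p.1]
  else
    let p := pvCore z M R
    [p.1, p.2]

-- ===== PRECONDITION & SPEC =====
-- Pre_ excludes exactly M = 0, on which Python's '%' raises ZeroDivisionError (in A and in B alike).
def Pre_minmax_euclid_brute (z : Int) (M : Int) (R : Int) : Prop := M ≠ 0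
instance (z : Int) (M : Int) (R : Int) : Decidable (Pre_minmax_euclid_brute z M R) := by unfold Pre_minmax_euclid_brute; infer_instance
def pvWitness_minmax_euclid_brute : Int × Int × Int := (3, 7, 10)

def Spec_minmax_euclid_brute (z : Int) (M : Int) (R : Int) (out : List Int) : Prop := out = minmax_euclid_brute_alt z M R
instance (z : Int) (M : Int) (R : Int) (out : List Int) : Decidable (Spec_minmax_euclid_brute z M R out) := by unfold Spec_minmax_euclid_brute; infer_instance

-- ===== CLAIM (what is proved, stated in full; the proofs are below) =====
def Claim_equal_minmax_euclid_brute : Prop := ∀ (z : Int) (M : Int) (R : Int), Dom_minmax_euclid_brute z M R → Pre_minmax_euclid_brute z M R → Spec_minmax_euclid_brute z M R (minmax_euclid_brute z M R)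

-- ===== LEMMAS AND PROOFS =====

-- the value (w*z) % M (Python semantics: Int.fmod)
def pvV (z M w : Int) : Int := (w * z).fmod M

-- the multipliers A effectively looks at: w = 1 (the initial a = b = z % M) together with range(1, R)
def pvInW (R w : Int) : Prop := w = 1 ∨ (1 ≤ w ∧ w ≤ R - 1)

-- "p is (min, max) of pvV over pvInW, both attained"
def pvMM (z M R : Int) (p : Int × Int) : Prop :=
  (∃ w, pvInW R w ∧ pvV z M w = p.1) ∧ (∃ w, pvInW R w ∧ pvV z M w = p.2) ∧
  ∀ w, pvInW R w → p.1 ≤ pvV z M w ∧ pvV z M w ≤ p.2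

lemma pvMM_unique {z M R : Int} {p q : Int × Int} (hp : pvMM z M R p) (hq : pvMM z M R q) : p = q := by
  obtain ⟨⟨w1, hw1, e1⟩, ⟨w2, hw2, e2⟩, hb⟩ := hp
  obtain ⟨⟨u1, hu1, f1⟩, ⟨u2, hu2, f2⟩, hc⟩ := hq
  have h1 := hb u1 hu1; have h2 := hb u2 hu2
  have h3 := hc w1 hw1; have h4 := hc w2 hw2
  have : p.1 = q.1 := by omega
  have : p.2 = q.2 := by omega
  exact Prod.ext (by omega) (by omega)

lemma pvMM_congr {z M R R' : Int} {p : Int × Int} (h : ∀ w, pvInW R w ↔ pvInW R' w)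
    (hp : pvMM z M R p) : pvMM z M R' p := by
  obtain ⟨⟨w1, hw1, e1⟩, ⟨w2, hw2, e2⟩, hb⟩ := hp
  exact ⟨⟨w1, (h w1).1 hw1, e1⟩, ⟨w2, (h w2).1 hw2, e2⟩, fun w hw => hb w ((h w).2 hw)⟩

-- ---------- characterization of A ----------

lemma pyRange_nil {a b : Int} (h : b ≤ a) : PySem.List.pyRange a b = [] := by
  simp [PySem.List.pyRange]
  intro h'
  omega

lemma brute_fold_MM (z M : Int) (n : Nat) :
    pvMM z M (1 + (n : Int))
      ((PySem.List.pyRange 1 (1 + (n : Int))).foldl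
        (fun (s : Int × Int) w =>
          let v := PySem.Int.mod (w * z) M
          (if v < s.1 then v else s.1, if v > s.2 then v else s.2))
        (PySem.Int.mod z M, PySem.Int.mod z M)) := by
  induction n with
  | zero =>
    rw [pyRange_nil (by omega)]
    refine ⟨⟨1, Or.inl rfl, ?_⟩, ⟨1, Or.inl rfl, ?_⟩, ?_⟩
    · simp [pvV, PySem.Int.mod]
    · simp [pvV, PySem.Int.mod]
    · rintro w (rfl | hw)
      · simp [pvV, PySem.Int.mod]
      · omega
  | succ n ih =>
    have hrw : (1 + ((n:Int) + 1)) = (1 + (n:Int)) + 1 := by ring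
    push_cast
    rw [hrw, PySem.List.pyRange_one_succ_right (by omega), List.foldl_append]
    obtain ⟨⟨w1, hw1, e1⟩, ⟨w2, hw2, e2⟩, hb⟩ := ih
    set s := (PySem.List.pyRange 1 (1 + (n : Int))).foldl
        (fun (s : Int × Int) w =>
          let v := PySem.Int.mod (w * z) M
          (if v < s.1 then v else s.1, if v > s.2 then v else s.2))
        (PySem.Int.mod z M, PySem.Int.mod z M) with hs
    simp only [List.foldl_cons, List.foldl_nil]
    set v := PySem.Int.mod ((1 + (n:Int)) * z) M with hv
    have hvv : v = pvV z M (1 + (n:Int)) := rfl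
    have hv1 := hb 1 (Or.inl rfl)
    constructor
    · -- new min attained
      by_cases h : v < s.1
      · refine ⟨1 + (n:Int), Or.inr ⟨by omega, by omega⟩, ?_⟩
        simp only [if_pos h]
        exact hvv.symm
      · refine ⟨w1, ?_, ?_⟩
        · rcases hw1 with h' | h'
          · exact Or.inl h'
          · exact Or.inr ⟨h'.1, by omega⟩
        · simp only [if_neg h]
          exact e1
    constructor
    · by_cases h : v > s.2
      · refine ⟨1 + (n:Int), Or.inr ⟨by omega, by omega⟩, ?_⟩
        simp only [if_pos h]
        exact hvv.symm
      · refine ⟨w2, ?_, ?_⟩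
        · rcases hw2 with h' | h'
          · exact Or.inl h'
          · exact Or.inr ⟨h'.1, by omega⟩
        · simp only [if_neg h]
          exact e2
    · rintro w hw
      have key : s.1 ≤ pvV z M w ∧ pvV z M w ≤ s.2 ∨ pvV z M w = v := by
        by_cases hwn : w = 1 + (n:Int)
        · right; rw [hwn, hvv]
        · left
          refine hb w ?_
          rcases hw with h' | h'
          · exact Or.inl h'
          · exact Or.inr ⟨h'.1, by omega⟩
      by_cases h1 : v < s.1 <;> by_cases h2 : v > s.2 <;>
        simp only [if_pos, if_neg, h1, h2, if_true, if_false] <;>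
        rcases key with ⟨k1, k2⟩ | k <;> simp_all <;> omega

lemma brute_MM (z M R : Int) :
    ∃ x y, minmax_euclid_brute z M R = [x, y] ∧ pvMM z M R (x, y) := by
  have h := brute_fold_MM z M (R - 1).toNat
  have hiff : ∀ w, pvInW (1 + (((R - 1).toNat : Int))) w ↔ pvInW R w := by
    intro w; unfold pvInW; omega
  have h' := pvMM_congr hiff h
  have hrange : PySem.List.pyRange 1 R = PySem.List.pyRange 1 (1 + (((R - 1).toNat : Int))) := by
    by_cases hR : R ≤ 1
    · rw [pyRange_nil hR, pyRange_nil (by omega)]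
    · congr 1; omega
  refine ⟨_, _, ?_, h'⟩
  unfold minmax_euclid_brute
  rw [hrange]

-- ---------- value arithmetic for M > 0 ----------

lemma pvV_bounds {z M : Int} (hM : 0 < M) (w : Int) : 0 ≤ pvV z M w ∧ pvV z M w < M := by
  unfold pvV
  rw [Int.fmod_eq_emod]
  simp [Or.inl (le_of_lt hM)]
  exact ⟨Int.emod_nonneg _ (by omega), Int.emod_lt_of_pos _ hM⟩

lemma pvV_add {z M : Int} (hM : 0 < M) (a b : Int) :
    pvV z M (a + b) =
      if pvV z M a + pvV z M b < M then pvV z M a + pvV z M b else pvV z M a + pvV z M b - M := by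
  have hfe : ∀ x : Int, x.fmod M = x % M := by
    intro x; rw [Int.fmod_eq_emod, if_pos (Or.inl (le_of_lt hM))]; ring
  have hba := pvV_bounds hM (z := z) a
  have hbb := pvV_bounds hM (z := z) b
  have hsum : pvV z M (a + b) = (pvV z M a + pvV z M b) % M := by
    unfold pvV at *
    rw [hfe, hfe, hfe, add_mul, Int.add_emod]
  split_ifs with h
  · rw [hsum, Int.emod_eq_of_lt (by omega) h]
  · rw [hsum]
    have h2 : (pvV z M a + pvV z M b) % M = (pvV z M a + pvV z M b - M) % M := by
      conv_lhs => rw [show pvV z M a + pvV z M b = (pvV z M a + pvV z M b - M) + M * 1 by ring]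
      rw [Int.add_mul_emod_self_left]
    rw [h2, Int.emod_eq_of_lt (by omega) (by omega)]

lemma pvV_add_lt {z M : Int} (hM : 0 < M) {a b : Int} (h : pvV z M a + pvV z M b < M) :
    pvV z M (a + b) = pvV z M a + pvV z M b := by
  rw [pvV_add hM, if_pos h]

lemma pvV_add_ge {z M : Int} (hM : 0 < M) {a b : Int} (h : M ≤ pvV z M a + pvV z M b) :
    pvV z M (a + b) = pvV z M a + pvV z M b - M := by
  rw [pvV_add hM, if_neg (by omega)]

-- ---------- the loop invariant ----------

def pvInv (z M R mn wmn mx wmx : Int) : Prop :=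
  0 ≤ mn ∧ mx < M ∧
  1 ≤ wmn ∧ wmn ≤ R - 1 ∧ 1 ≤ wmx ∧ wmx ≤ R - 1 ∧
  pvV z M wmn = mn ∧ pvV z M wmx = mx ∧
  ∀ w, 1 ≤ w → w < wmn + wmx → mn ≤ pvV z M w ∧ pvV z M w ≤ mx

lemma pv_descend {z M R mn wmn mx wmx : Int} (hM : 0 < M)
    (inv : pvInv z M R mn wmn mx wmx) (hge : M ≤ mn + mx) :
    ∀ j : Nat, (j : Int) * (M - mx) ≤ mn →
      pvV z M (wmn + j * wmx) = mn - j * (M - mx) ∧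
      ∀ w, 1 ≤ w → w < wmn + j * wmx + wmx →
        mn - j * (M - mx) ≤ pvV z M w ∧ pvV z M w ≤ mx := by
  obtain ⟨h1, h2, h3, h4, h5, h6, h7, h8, h9⟩ := inv
  intro j
  induction j with
  | zero =>
    intro _
    constructor
    · simpa using h7
    · intro w hw1 hw2
      simp only [Nat.cast_zero, zero_mul, add_zero, sub_zero] at hw2 ⊢
      exact h9 w hw1 (by omega)
  | succ j ih =>
    intro hj1
    have hd1 : (1 : Int) ≤ M - mx := by omega
    have hjd : ((j : Int)) * (M - mx) ≤ mn := by
      have : ((j : Int)) * (M - mx) ≤ ((j : Int) + 1) * (M - mx) :=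
        mul_le_mul_of_nonneg_right (by omega) (by omega)
      push_cast at hj1; linarith
    obtain ⟨ihv, ihb⟩ := ih hjd
    have hjd' : ((j : Int)) * (M - mx) + (M - mx) ≤ mn := by push_cast at hj1; linarith
    have hstep : pvV z M (wmn + ((j : Int) + 1) * wmx) = mn - ((j : Int) + 1) * (M - mx) := by
      have hrw : wmn + ((j : Int) + 1) * wmx = (wmn + (j : Int) * wmx) + wmx := by ring
      rw [hrw, pvV_add_ge hM (by rw [ihv, h8]; linarith)]
      rw [ihv, h8]; ring
    constructor
    · push_cast
      exact hstep
    · intro w hw1 hw2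
      push_cast at hw2 ⊢
      rw [show ((j : Int) + 1) * wmx = (j : Int) * wmx + wmx from by ring] at hw2
      rw [show ((j : Int) + 1) * (M - mx) = (j : Int) * (M - mx) + (M - mx) from by ring]
      by_cases hcase : w < wmn + (j : Int) * wmx + wmx
      · have := ihb w hw1 hcase
        constructor
        · linarith
        · exact this.2
      · have hjwx : 0 ≤ (j : Int) * wmx := mul_nonneg (by positivity) (by omega)
        have hw'1 : 1 ≤ w - wmx := by omega
        have hw'2 : w - wmx < wmn + (j : Int) * wmx + wmx := by omega
        obtain ⟨b1, b2⟩ := ihb (w - wmx) hw'1 hw'2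
        have hge : M ≤ pvV z M (w - wmx) + pvV z M wmx := by rw [h8]; linarith
        have hval := pvV_add_ge hM hge
        rw [show w - wmx + wmx = w from by ring] at hval
        rw [hval, h8]
        constructor
        · linarith
        · linarith

lemma pv_ascend {z M R mn wmn mx wmx : Int} (hM : 0 < M)
    (inv : pvInv z M R mn wmn mx wmx) (hlt : mn + mx < M) :
    ∀ j : Nat, mx + j * mn ≤ M - 1 →
      pvV z M (wmx + j * wmn) = mx + j * mn ∧
      ∀ w, 1 ≤ w → w < wmx + j * wmn + wmn →
        mn ≤ pvV z M w ∧ pvV z M w ≤ mx + j * mn := by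
  obtain ⟨h1, h2, h3, h4, h5, h6, h7, h8, h9⟩ := inv
  intro j
  induction j with
  | zero =>
    intro _
    constructor
    · simpa using h8
    · intro w hw1 hw2
      simp only [Nat.cast_zero, zero_mul, add_zero] at hw2 ⊢
      exact h9 w hw1 (by omega)
  | succ j ih =>
    intro hj1
    have hjmn : mx + (j : Int) * mn ≤ M - 1 := by
      have : ((j : Int)) * mn ≤ ((j : Int) + 1) * mn :=
        mul_le_mul_of_nonneg_right (by omega) h1
      push_cast at hj1; linarith
    obtain ⟨ihv, ihb⟩ := ih hjmn
    have hj1' : mx + ((j : Int) + 1) * mn ≤ M - 1 := by push_cast at hj1; linarith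
    have hstep : pvV z M (wmx + ((j : Int) + 1) * wmn) = mx + ((j : Int) + 1) * mn := by
      have hrw : wmx + ((j : Int) + 1) * wmn = (wmx + (j : Int) * wmn) + wmn := by ring
      rw [hrw, pvV_add_lt hM (by rw [ihv, h7]; linarith)]
      rw [ihv, h7]; ring
    constructor
    · push_cast
      exact hstep
    · intro w hw1 hw2
      push_cast at hw2 ⊢
      rw [show ((j : Int) + 1) * wmn = (j : Int) * wmn + wmn from by ring] at hw2
      rw [show ((j : Int) + 1) * mn = (j : Int) * mn + mn from by ring]
      by_cases hcase : w < wmx + (j : Int) * wmn + wmn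
      · have := ihb w hw1 hcase
        constructor
        · exact this.1
        · linarith
      · have hjwn : 0 ≤ (j : Int) * wmn := mul_nonneg (by positivity) (by omega)
        have hw'1 : 1 ≤ w - wmn := by omega
        have hw'2 : w - wmn < wmx + (j : Int) * wmn + wmn := by omega
        obtain ⟨b1, b2⟩ := ihb (w - wmn) hw'1 hw'2
        have hlt : pvV z M (w - wmn) + pvV z M wmn < M := by rw [h7]; linarith
        have hval := pvV_add_lt hM hlt
        rw [show w - wmn + wmn = w from by ring] at hval
        rw [hval, h7]
        constructor
        · linarith
        · linarith

lemma pv_periodic {z M wmn : Int} (hM : 0 < M) (h0 : pvV z M wmn = 0) (hw : 1 ≤ wmn) :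
    ∀ n : Nat, ∀ w : Int, 1 ≤ w → w ≤ (n : Int) →
      ∃ w', 1 ≤ w' ∧ w' ≤ wmn ∧ pvV z M w' = pvV z M w := by
  intro n
  induction n with
  | zero => intro w hw1 hw2; omega
  | succ n ih =>
    intro w hw1 hw2
    by_cases hle : w ≤ wmn
    · exact ⟨w, hw1, hle, rfl⟩
    · have hb := pvV_bounds hM (z := z) (w - wmn)
      have heq : pvV z M w = pvV z M (w - wmn) := by
        have hval := pvV_add_lt hM (a := w - wmn) (b := wmn) (by rw [h0]; omega)
        rw [show w - wmn + wmn = w from by ring] at hval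
        rw [hval, h0, add_zero]
      obtain ⟨w', a1, a2, a3⟩ := ih (w - wmn) (by omega) (by push_cast at hw2 ⊢; omega)
      exact ⟨w', a1, a2, by rw [a3, heq]⟩

lemma pv_fdiv_pos {a b : Int} (hb : 0 ≤ b) : PySem.Int.floordiv a b = a / b := by
  unfold PySem.Int.floordiv
  rw [Int.fdiv_eq_ediv, if_pos (Or.inl hb)]
  ring

lemma pv_break_MM {z M R mn wmn mx wmx : Int} (hR : 2 ≤ R)
    (h3 : 1 ≤ wmn) (h4 : wmn ≤ R - 1) (h5 : 1 ≤ wmx) (h6 : wmx ≤ R - 1)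
    (h7 : pvV z M wmn = mn) (h8 : pvV z M wmx = mx)
    (h9 : ∀ w, 1 ≤ w → w < wmn + wmx → mn ≤ pvV z M w ∧ pvV z M w ≤ mx)
    (hcov : R - 1 < wmn + wmx) :
    pvMM z M R (mn, mx) := by
  refine ⟨⟨wmn, Or.inr ⟨h3, h4⟩, h7⟩, ⟨wmx, Or.inr ⟨h5, h6⟩, h8⟩, ?_⟩
  rintro w (rfl | ⟨a, b⟩)
  · exact h9 1 le_rfl (by omega)
  · exact h9 w a (by omega)

lemma pv_loop_MM {z M R : Int} (hM : 0 < M) (hR : 2 ≤ R) :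
    ∀ fuel : Nat, ∀ mn wmn mx wmx : Int,
      pvInv z M R mn wmn mx wmx → (M - 1 - (mx - mn)).toNat < fuel →
      pvMM z M R (pvEuclidLoop z M R fuel mn wmn mx wmx) := by
  intro fuel
  induction fuel with
  | zero =>
    intro mn wmn mx wmx _ hmeas
    exact absurd hmeas (Nat.not_lt_zero _)
  | succ fuel ih =>
    intro mn wmn mx wmx inv hmeas
    obtain ⟨h1, h2, h3, h4, h5, h6, h7, h8, h9⟩ := inv
    have hmnmx : mn ≤ mx := by
      have := h9 wmn h3 (by omega)
      omega
    simp only [pvEuclidLoop]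
    by_cases hc : M ≤ mn + mx
    · rw [if_pos hc]
      rw [pv_fdiv_pos (show (0:Int) ≤ wmx by omega)]
      by_cases hk : (R - 1 - wmn) / wmx = 0
      · rw [if_pos hk]
        have hcov : R - 1 - wmn < wmx := by
          by_contra hcon
          have : 1 ≤ (R - 1 - wmn) / wmx := by
            rw [Int.le_ediv_iff_mul_le (by omega)]
            omega
          omega
        exact pv_break_MM hR h3 h4 h5 h6 h7 h8 h9 (by omega)
      · rw [if_neg hk]
        rw [pv_fdiv_pos (show (0:Int) ≤ M - mx by omega)]
        set k := min (mn / (M - mx)) ((R - 1 - wmn) / wmx) with hkdef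
        have hkk1 : 1 ≤ (R - 1 - wmn) / wmx := by
          have : 0 ≤ (R - 1 - wmn) / wmx := Int.ediv_nonneg (by omega) (by omega)
          omega
        have hkd1 : 1 ≤ mn / (M - mx) := by
          rw [Int.le_ediv_iff_mul_le (by omega)]
          omega
        have hk1 : 1 ≤ k := le_min hkd1 hkk1
        have hkdle : k * (M - mx) ≤ mn := by
          rw [← Int.le_ediv_iff_mul_le (by omega)]
          exact min_le_left _ _
        have hkwle : k * wmx ≤ R - 1 - wmn := by
          rw [← Int.le_ediv_iff_mul_le (by omega)]
          exact min_le_right _ _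
        have hcast : ((k.toNat : Int)) = k := Int.toNat_of_nonneg (by omega)
        obtain ⟨dv, db⟩ := pv_descend hM
          ⟨h1, h2, h3, h4, h5, h6, h7, h8, h9⟩ hc k.toNat (by rw [hcast]; exact hkdle)
        rw [hcast] at dv db
        have hkwx1 : (1:Int) * 1 ≤ k * wmx := mul_le_mul hk1 h5 (by norm_num) (by omega)
        have inv' : pvInv z M R (mn - k * (M - mx)) (wmn + k * wmx) mx wmx :=
          ⟨by linarith, h2, by linarith, by linarith, h5, h6, dv, h8, db⟩
        refine ih _ _ _ _ inv' ?_
        have hprod1 : (1:Int) * 1 ≤ k * (M - mx) := mul_le_mul hk1 (by omega) (by norm_num) (by omega)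
        generalize hq : k * (M - mx) = q at hprod1 hkdle ⊢
        omega
    · rw [if_neg hc]
      by_cases hz : mn = 0
      · rw [if_pos hz]
        refine ⟨⟨wmn, Or.inr ⟨h3, h4⟩, h7⟩, ⟨wmx, Or.inr ⟨h5, h6⟩, h8⟩, ?_⟩
        have h0 : pvV z M wmn = 0 := by rw [h7, hz]
        intro w hw
        have hw1 : 1 ≤ w := by
          rcases hw with rfl | ⟨a, b⟩
          · exact le_rfl
          · exact a
        obtain ⟨w', a1, a2, a3⟩ := pv_periodic hM h0 h3 w.toNat w hw1 (by omega)
        have := h9 w' a1 (by omega)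
        rw [a3] at this
        exact this
      · rw [if_neg hz]
        rw [pv_fdiv_pos (show (0:Int) ≤ wmn by omega)]
        by_cases hk : (R - 1 - wmx) / wmn = 0
        · rw [if_pos hk]
          have hcov : R - 1 - wmx < wmn := by
            by_contra hcon
            have : 1 ≤ (R - 1 - wmx) / wmn := by
              rw [Int.le_ediv_iff_mul_le (by omega)]
              omega
            omega
          exact pv_break_MM hR h3 h4 h5 h6 h7 h8 h9 (by omega)
        · rw [if_neg hk]
          rw [pv_fdiv_pos (show (0:Int) ≤ mn by omega)]
          set k := min ((M - 1 - mx) / mn) ((R - 1 - wmx) / wmn) with hkdef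
          have hkk1 : 1 ≤ (R - 1 - wmx) / wmn := by
            have : 0 ≤ (R - 1 - wmx) / wmn := Int.ediv_nonneg (by omega) (by omega)
            omega
          have hkd1 : 1 ≤ (M - 1 - mx) / mn := by
            rw [Int.le_ediv_iff_mul_le (by omega)]
            omega
          have hk1 : 1 ≤ k := le_min hkd1 hkk1
          have hkmle : k * mn ≤ M - 1 - mx := by
            rw [← Int.le_ediv_iff_mul_le (by omega)]
            exact min_le_left _ _
          have hkwle : k * wmn ≤ R - 1 - wmx := by
            rw [← Int.le_ediv_iff_mul_le (by omega)]
            exact min_le_right _ _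
          have hcast : ((k.toNat : Int)) = k := Int.toNat_of_nonneg (by omega)
          obtain ⟨av, ab⟩ := pv_ascend hM
            ⟨h1, h2, h3, h4, h5, h6, h7, h8, h9⟩ (by omega) k.toNat (by rw [hcast]; omega)
          rw [hcast] at av ab
          have hkwn1 : (1:Int) * 1 ≤ k * wmn := mul_le_mul hk1 h3 (by norm_num) (by omega)
          have h9' : ∀ w, 1 ≤ w → w < wmn + (wmx + k * wmn) →
              mn ≤ pvV z M w ∧ pvV z M w ≤ mx + k * mn := by
            intro w hw hlt
            exact ab w hw (by linarith)
          have inv' : pvInv z M R mn wmn (mx + k * mn) (wmx + k * wmn) :=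
            ⟨h1, by linarith, h3, h4, by linarith, by linarith, h7, av, h9'⟩
          refine ih _ _ _ _ inv' ?_
          have hprod1 : (1:Int) * 1 ≤ k * mn := mul_le_mul hk1 (by omega) (by norm_num) (by omega)
          generalize hq : k * mn = q at hprod1 hkmle ⊢
          omega

lemma pv_core_MM {z M R : Int} (hM : 0 < M) : pvMM z M R (pvCore z M R) := by
  have hv1 : pvV z M 1 = PySem.Int.mod z M := by simp [pvV, PySem.Int.mod]
  have hb := pvV_bounds hM (z := z) 1
  simp only [pvCore]
  by_cases hR : R ≤ 1
  · rw [if_pos hR]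
    refine ⟨⟨1, Or.inl rfl, hv1⟩, ⟨1, Or.inl rfl, hv1⟩, ?_⟩
    rintro w (rfl | ⟨a, b⟩)
    · rw [hv1]
      exact ⟨le_rfl, le_rfl⟩
    · omega
  · rw [if_neg hR]
    refine pv_loop_MM hM (by omega) _ _ _ _ _
      ⟨by omega, by omega, le_rfl, by omega, le_rfl, by omega, hv1, hv1, ?_⟩ (by omega)
    intro w hw1 hw2
    have hw : w = 1 := by omega
    subst hw
    rw [hv1]
    exact ⟨le_rfl, le_rfl⟩

lemma alt_MM (z M R : Int) (hM : M ≠ 0) :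
    ∃ x y, minmax_euclid_brute_alt z M R = [x, y] ∧ pvMM z M R (x, y) := by
  by_cases hneg : M < 0
  · have hM' : 0 < -M := by omega
    obtain ⟨⟨w1, hw1, e1⟩, ⟨w2, hw2, e2⟩, hbd⟩ := pv_core_MM (z := -z) (R := R) hM'
    have hflip : ∀ w : Int, pvV (-z) (-M) w = - pvV z M w := by
      intro w
      unfold pvV
      rw [show w * -z = -(w * z) from by ring]
      have := PySem.Int.mod_neg_neg (w * z) M
      simpa [PySem.Int.mod] using this
    refine ⟨-(pvCore (-z) (-M) R).2, -(pvCore (-z) (-M) R).1, ?_, ?_, ?_, ?_⟩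
    · simp only [minmax_euclid_brute_alt, if_pos hneg]
    · refine ⟨w2, hw2, ?_⟩
      have := hflip w2
      omega
    · refine ⟨w1, hw1, ?_⟩
      have := hflip w1
      omega
    · intro w hw
      have hb := hbd w hw
      have := hflip w
      constructor <;> omega
  · have hM0 : 0 < M := by omega
    have h := pv_core_MM (z := z) (M := M) (R := R) hM0
    refine ⟨(pvCore z M R).1, (pvCore z M R).2, ?_, ?_⟩
    · simp only [minmax_euclid_brute_alt, if_neg hneg]
    · rw [Prod.mk.eta]
      exact h

-- ===== VERDICT (by name: the statement is the Claim_ definition above) =====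
theorem minmax_euclid_brute_spec : Claim_equal_minmax_euclid_brute := by
  intro z M R _ hpre
  unfold Spec_minmax_euclid_brute
  obtain ⟨x, y, ha, hmm⟩ := brute_MM z M R
  obtain ⟨x', y', hb, hmm'⟩ := alt_MM z M R hpre
  have := pvMM_unique hmm hmm'
  rw [ha, hb]
  simp at this
  simp [this.1, this.2]
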